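-- pv_equiv track=rewrite | github.com/berenickt/Practice-CodingTest-Python | prog-high-score-kit/05-brute-force(완전탐색)-무식하게/02-lv1-모의고사-42840.py | solution
-- ===== SOURCE A (Python) =====
-- def solution(answers):
--     student1 = [1, 2, 3, 4, 5]
--     student2 = [2, 1, 2, 3, 2, 4, 2, 5]
--     student3 = [3, 3, 1, 1, 2, 2, 4, 4, 5, 5]
--     score = [0, 0, 0]
--     answer = []
--
--     for i in range(len(answers)):
--         if answers[i] == student1[i % 5]:
--             score[0] += 1
--         if answers[i] == student2[i % 8]:
--             score[1] += 1
--         if answers[i] == student3[i % 10]: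
--             score[2] += 1
--
--     for idx, num in enumerate(score):
--         if num == max(score):
--             answer.append(idx + 1)
--
--     return answer
-- ===== SOURCE B (Python) =====
-- def solution(answers):
--     patterns = [[1, 2, 3, 4, 5],
--                 [2, 1, 2, 3, 2, 4, 2, 5],
--                 [3, 3, 1, 1, 2, 2, 4, 4, 5, 5]]
--     # The three patterns repeat with periods 5, 8, 10, all dividing 40, so a
--     # student's score only depends on how often each (position mod 40, value)
--     # pair occurs.  Build that frequency table once, then score each student
--     # from the table instead of from the answer list.
--     freq = {}
--     for i, a in enumerate(answers):
--         key = (i % 40, a)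
--         freq[key] = freq.get(key, 0) + 1
--     scores = []
--     for p in patterns:
--         scores.append(sum(c for (r, a), c in freq.items() if a == p[r % len(p)]))
--     best = max(scores)
--     return [k + 1 for k, s in enumerate(scores) if s == best]
-- ===== Notes on version B (the rewrite author's own statement) =====
-- stated objective: alternative
-- what changed: B no longer scores students while scanning the answers: it compresses the answers once into a frequency table keyed by (index mod 40, value) -- 40 being the lcm of the three pattern periods 5/8/10 -- and then computes each student's score purely from that table, whereas A's single fused loop compares every answer against all three patterns and updates three counters in place.
import Mathlib
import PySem

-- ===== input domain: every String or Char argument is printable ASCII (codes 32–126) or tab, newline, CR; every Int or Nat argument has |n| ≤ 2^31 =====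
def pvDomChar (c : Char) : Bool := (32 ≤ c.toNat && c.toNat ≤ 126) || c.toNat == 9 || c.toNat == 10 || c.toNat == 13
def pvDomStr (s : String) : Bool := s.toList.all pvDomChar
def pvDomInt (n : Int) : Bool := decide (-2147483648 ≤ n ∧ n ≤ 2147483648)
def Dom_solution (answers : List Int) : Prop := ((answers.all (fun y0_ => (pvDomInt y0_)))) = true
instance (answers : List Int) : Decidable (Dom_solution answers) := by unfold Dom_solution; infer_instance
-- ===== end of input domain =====

-- B compresses the answers into a frequency table keyed by (index mod 40, value) —
-- 40 = lcm of the three pattern periods — and scores each student from the table,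
-- instead of A's single fused loop over the answers updating three counters.


-- ===== PORT A =====
def solution (answers : List Int) : List Int :=
  let student1 : List Int := [1, 2, 3, 4, 5]
  let student2 : List Int := [2, 1, 2, 3, 2, 4, 2, 5]
  let student3 : List Int := [3, 3, 1, 1, 2, 2, 4, 4, 5, 5]
  -- for i in range(len(answers)): three independent ifs updating score[0..2]
  let score : Int × Int × Int :=
    (PySem.List.enumerate answers).foldl
      (fun (sc : Int × Int × Int) (ia : Int × Int) =>
        let s0 := if ia.2 = PySem.List.pyGetD student1 (PySem.Int.mod ia.1 5) 0 then sc.1 + 1 else sc.1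
        let s1 := if ia.2 = PySem.List.pyGetD student2 (PySem.Int.mod ia.1 8) 0 then sc.2.1 + 1 else sc.2.1
        let s2 := if ia.2 = PySem.List.pyGetD student3 (PySem.Int.mod ia.1 10) 0 then sc.2.2 + 1 else sc.2.2
        (s0, s1, s2))
      (0, 0, 0)
  let scoreList : List Int := [score.1, score.2.1, score.2.2]
  let m : Int := (PySem.List.max? scoreList (fun y => y)).getD 0   -- max(score); scoreList nonempty
  (PySem.List.enumerate scoreList).foldl
    (fun (answer : List Int) (p : Int × Int) =>
      if p.2 = m then answer ++ [p.1 + 1] else answer) []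

-- ===== PORT B =====
-- freq[key] = freq.get(key, 0) + 1 over key = (i % 40, a)
def pvFreq (answers : List Int) : PySem.Dict (Int × Int) Int :=
  (PySem.List.enumerate answers).foldl
    (fun (d : PySem.Dict (Int × Int) Int) ia =>
      let key : Int × Int := (PySem.Int.mod ia.1 40, ia.2)
      d.insert key (d.getD key 0 + 1))
    PySem.Dict.empty

-- sum(c for (r, a), c in freq.items() if a == p[r % len(p)])
def pvTableScore (freq : PySem.Dict (Int × Int) Int) (p : List Int) : Int :=
  freq.items.foldl
    (fun (s : Int) kv =>
      if kv.1.2 = PySem.List.pyGetD p (PySem.Int.mod kv.1.1 (p.length : Int)) 0 then s + kv.2 else s)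
    0

def solution_alt (answers : List Int) : List Int :=
  let patterns : List (List Int) :=
    [[1, 2, 3, 4, 5], [2, 1, 2, 3, 2, 4, 2, 5], [3, 3, 1, 1, 2, 2, 4, 4, 5, 5]]
  let freq := pvFreq answers
  let scores : List Int := patterns.map (pvTableScore freq)
  let best : Int := (PySem.List.max? scores (fun y => y)).getD 0
  ((PySem.List.enumerate scores).filter (fun q => q.2 = best)).map (fun q => q.1 + 1)

-- ===== PRECONDITION & SPEC =====
def Spec_solution (answers : List Int) (out : List Int) : Prop := out = solution_alt answers
instance (answers : List Int) (out : List Int) : Decidable (Spec_solution answers out) := by unfold Spec_solution; infer_instance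

-- ===== CLAIM (what is proved, stated in full; the proofs are below) =====
def Claim_equal_solution : Prop := ∀ (answers : List Int), Dom_solution answers → Spec_solution answers (solution answers)

-- ===== LEMMAS AND PROOFS =====

-- A's fused loop is the triple of three independent counts (any start index, any accumulator).
lemma fused_eq_counts (answers : List Int) (s a b c : Int) :
    (PySem.List.enumerate answers s).foldl
      (fun (sc : Int × Int × Int) (ia : Int × Int) =>
        let s0 := if ia.2 = PySem.List.pyGetD [1,2,3,4,5] (PySem.Int.mod ia.1 5) 0 then sc.1 + 1 else sc.1
        let s1 := if ia.2 = PySem.List.pyGetD [2,1,2,3,2,4,2,5] (PySem.Int.mod ia.1 8) 0 then sc.2.1 + 1 else sc.2.1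
        let s2 := if ia.2 = PySem.List.pyGetD [3,3,1,1,2,2,4,4,5,5] (PySem.Int.mod ia.1 10) 0 then sc.2.2 + 1 else sc.2.2
        (s0, s1, s2))
      (a, b, c)
    = (a + ((PySem.List.enumerate answers s).countP
             (fun ia => ia.2 = PySem.List.pyGetD [1,2,3,4,5] (PySem.Int.mod ia.1 5) 0) : Nat),
       b + ((PySem.List.enumerate answers s).countP
             (fun ia => ia.2 = PySem.List.pyGetD [2,1,2,3,2,4,2,5] (PySem.Int.mod ia.1 8) 0) : Nat),
       c + ((PySem.List.enumerate answers s).countP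
             (fun ia => ia.2 = PySem.List.pyGetD [3,3,1,1,2,2,4,4,5,5] (PySem.Int.mod ia.1 10) 0) : Nat)) := by
  induction answers generalizing s a b c with
  | nil => simp [PySem.List.enumerate_nil]
  | cons x xs ih =>
      rw [PySem.List.enumerate_cons]
      simp only [List.foldl_cons, List.countP_cons, decide_eq_true_eq]
      rw [ih]
      split_ifs <;> simp only [Prod.mk.injEq] <;> refine ⟨?_, ?_, ?_⟩ <;> push_cast <;> ring

-- A's final append loop is a filter-map over the enumerated score list.
lemma append_loop_eq_filter_map (m : Int) (l : List (Int × Int)) :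
    l.foldl (fun (ans : List Int) p => if p.2 = m then ans ++ [p.1 + 1] else ans) [] =
    (l.filter (fun p => p.2 = m)).map (fun p => p.1 + 1) := by
  induction l using List.reverseRecOn with
  | nil => simp
  | append_singleton xs x ih => simp [List.filter_append, ih]; split_ifs <;> simp_all

-- mod collapses through mod 40 when the period divides 40
lemma mod40_mod (i L : Nat) (hd : L ∣ 40) :
    PySem.Int.mod (PySem.Int.mod (i : Int) 40) (L : Int) = PySem.Int.mod (i : Int) (L : Int) := by
  have h1 : PySem.Int.mod (i : Int) 40 = ((i % 40 : Nat) : Int) := by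
    exact_mod_cast PySem.Int.mod_natCast i 40
  rw [h1, PySem.Int.mod_natCast, PySem.Int.mod_natCast, Nat.mod_mod_of_dvd i hd]

-- summing a 0/1 indicator over a duplicate-free list
lemma sum_indicator {α : Type} [BEq α] [LawfulBEq α] (a : α) (E : List α) (hE : E.Nodup) :
    (E.map (fun k => if a == k then (1 : Int) else 0)).sum = if a ∈ E then (1 : Int) else 0 := by
  induction E with
  | nil => simp
  | cons x t ih =>
      simp only [List.map_cons, List.sum_cons, List.mem_cons]
      have ht := ih (List.nodup_cons.1 hE).2
      by_cases hax : a = x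
      · subst hax
        have : a ∉ t := (List.nodup_cons.1 hE).1
        simp [ht, this]
      · simp [hax, ht, beq_iff_eq]

-- the counts of a list summed over its distinct elements give its length
lemma sum_count_ofList {α : Type} [BEq α] [LawfulBEq α] (l : List α) :
    ((PySem.Set.ofList l).map (fun k => (l.count k : Int))).sum = (l.length : Int) := by
  induction l using List.reverseRecOn with
  | nil => simp [PySem.Set.ofList]
  | append_singleton t a ih =>
      have hof : PySem.Set.ofList (t ++ [a]) = PySem.Set.add (PySem.Set.ofList t) a := by
        simp [PySem.Set.ofList_eq_foldl, List.foldl_append]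
      have hterm : (fun k => (((t ++ [a]).count k : Nat) : Int))
          = fun k => (t.count k : Int) + (if a == k then (1 : Int) else 0) := by
        funext k
        rw [List.count_append]
        push_cast
        simp [List.count_cons]
      rw [hof, hterm]
      by_cases hmem : a ∈ PySem.Set.ofList t
      · rw [PySem.Set.add_of_mem hmem]
        rw [PySem.List.sum_map_add_int, ih, sum_indicator a _ (PySem.Set.nodup_ofList t)]
        simp [hmem]
      · rw [PySem.Set.add_of_not_mem hmem]
        rw [List.map_append, List.sum_append]
        rw [PySem.List.sum_map_add_int, ih, sum_indicator a _ (PySem.Set.nodup_ofList t)]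
        have hat : a ∉ t := fun h => hmem ((PySem.Set.mem_ofList t a).2 h)
        simp [hmem, List.count_eq_zero_of_not_mem hat]

-- B's table score equals the per-answer match count for any pattern whose length divides 40.
lemma tableScore_eq (answers p : List Int) (hd : p.length ∣ 40) :
    pvTableScore (pvFreq answers) p
      = ((PySem.List.enumerate answers).countP
          (fun ia => ia.2 = PySem.List.pyGetD p (PySem.Int.mod ia.1 (p.length : Int)) 0) : Nat) := by
  set L : Int := (p.length : Int) with hL
  set p' : (Int × Int) → Bool :=
    fun k => decide (k.2 = PySem.List.pyGetD p (PySem.Int.mod k.1 L) 0) with hp'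
  set ks : List (Int × Int) :=
    (PySem.List.enumerate answers).map (fun ia => (PySem.Int.mod ia.1 40, ia.2)) with hks
  -- the built dict is Counter(ks)
  have hbuild : pvFreq answers = PySem.Dict.counter ks := by
    rw [← PySem.Dict.foldl_insert_getD_add_one_eq_counter, hks, List.foldl_map]
    rfl
  rw [hbuild]
  unfold pvTableScore
  rw [PySem.Dict.items_counter]
  rw [PySem.List.foldl_ite_eq_foldl_filter
        (p := fun kv : (Int × Int) × Int => kv.1.2 = PySem.List.pyGetD p (PySem.Int.mod kv.1.1 L) 0)]
  rw [PySem.List.foldl_add (g := fun kv : (Int × Int) × Int => kv.2)]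
  rw [List.filter_map, List.map_map]
  have hfun : ((fun kv : (Int × Int) × Int => kv.2) ∘ (fun k : Int × Int => (k, (ks.count k : Int))))
      = fun k : Int × Int => (ks.count k : Int) := rfl
  have hpred : ((fun kv : (Int × Int) × Int =>
        decide (kv.1.2 = PySem.List.pyGetD p (PySem.Int.mod kv.1.1 L) 0))
        ∘ (fun k : Int × Int => (k, (ks.count k : Int)))) = p' := rfl
  rw [hfun, hpred, zero_add]
  -- restrict the counts to the matching keys
  have hcnt : ∀ k ∈ (PySem.Set.ofList ks).filter p',
      (ks.count k : Int) = ((ks.filter p').count k : Int) := by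
    intro k hk
    have hpk : p' k = true := (List.mem_filter.1 hk).2
    exact_mod_cast (List.count_filter hpk).symm
  rw [List.map_congr_left hcnt]
  -- the filtered key set is the key set of the filtered list
  have hperm : ((PySem.Set.ofList ks).filter p').Perm (PySem.Set.ofList (ks.filter p')) := by
    refine (List.perm_ext_iff_of_nodup
      (List.Nodup.filter _ (PySem.Set.nodup_ofList ks)) (PySem.Set.nodup_ofList _)).2 ?_
    intro x
    simp [List.mem_filter, PySem.Set.mem_ofList]
  rw [List.Perm.sum_eq (List.Perm.map _ hperm), sum_count_ofList]
  rw [← List.countP_eq_length_filter]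
  -- countP over the mapped keys is countP over the enumeration
  rw [hks, List.countP_map]
  congr 1
  refine List.countP_congr ?_
  intro ia hia
  obtain ⟨k, hk, rfl⟩ := (PySem.List.mem_enumerate_iff _ _ _).1 hia
  simp only [hp', Function.comp_apply, zero_add, decide_eq_true_eq]
  rw [mod40_mod k p.length hd, hL]

-- ===== VERDICT (by name: the statement is the Claim_ definition above) =====
theorem solution_spec : Claim_equal_solution := by
  intro answers _
  unfold Spec_solution solution solution_alt
  dsimp only
  rw [fused_eq_counts, append_loop_eq_filter_map]
  rw [List.map_cons, List.map_cons, List.map_cons, List.map_nil]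
  rw [tableScore_eq answers [1,2,3,4,5] (by norm_num),
      tableScore_eq answers [2,1,2,3,2,4,2,5] (by norm_num),
      tableScore_eq answers [3,3,1,1,2,2,4,4,5,5] (by norm_num)]
  norm_num
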